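-- pv_equiv track=rewrite | github.com/JeremiahDay/foo_bar_solutions | ion_flux_relabeling/solution.py | solution
-- ===== SOURCE A (Python) =====
-- LEFT = False
--
-- RIGHT = True
--
-- def solution(h, q):
--     '''
--     h: height of tree
--     q: list of integers to consider'''
--     q_rev = [x for x in reversed(q)]
--     s = []
--     while q_rev:
--         n = q_rev.pop()
--         node = n
--         height = h
--         while True:
--             rank = int.bit_length(node)
--
--             if rank >= height:
--                 hand = RIGHT
--             else:
--                 hand = LEFT
--                 height = rank
--             if node == 2 ** height - 1:
--                 if hand == LEFT:
--                     offset = node + 1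
--                 else:
--                     offset = 1
--                 break
--             if hand == RIGHT:
--                 height -= 1
--                 node -= 2 ** height - 1
--
--         label = n + offset
--         if label >= 2 ** h:
--             s.append(-1)
--         else:
--             s.append(label)
--     return s
-- ===== SOURCE B (Python) =====
-- def solution(h, q):
--     def go(root, height, n):
--         # parent of node labelled n inside the subtree rooted at `root` of given height
--         if height <= 1:
--             return -1
--         left = root - 2 ** (height - 1)
--         right = root - 1
--         if n == left or n == right:
--             return root
--         if n <= left:
--             return go(left, height - 1, n)
--         return go(right, height - 1, n)
--     res = []
--     for n in q:
--         k = n.bit_length()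
--         # labels stay unchanged going down the left spine, so descend only inside the
--         # smallest left-spine subtree (height k) that contains n
--         if n == 2 ** k - 1:   # n is the root of that subtree
--             res.append(-1 if k == h else 2 ** (k + 1) - 1)
--         else:
--             res.append(go(2 ** k - 1, k, n))
--     return res
-- ===== Notes on version B (the rewrite author's own statement) =====
-- stated objective: faster
-- what changed: A iteratively re-labels the query node bottom-up inside ever-smaller subtrees, accumulating an offset with bit_length arithmetic and comparing each result against the h-bit number 2**h; B descends top-down, comparing the query against the two child-root labels at each level, starting at the smallest left-spine subtree that contains the query (left descents do not change labels), so it never materialises 2**h.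
-- outside the precondition, e.g. on solution(0, [0]): A returns [-1], B returns [-1]
import Mathlib
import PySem

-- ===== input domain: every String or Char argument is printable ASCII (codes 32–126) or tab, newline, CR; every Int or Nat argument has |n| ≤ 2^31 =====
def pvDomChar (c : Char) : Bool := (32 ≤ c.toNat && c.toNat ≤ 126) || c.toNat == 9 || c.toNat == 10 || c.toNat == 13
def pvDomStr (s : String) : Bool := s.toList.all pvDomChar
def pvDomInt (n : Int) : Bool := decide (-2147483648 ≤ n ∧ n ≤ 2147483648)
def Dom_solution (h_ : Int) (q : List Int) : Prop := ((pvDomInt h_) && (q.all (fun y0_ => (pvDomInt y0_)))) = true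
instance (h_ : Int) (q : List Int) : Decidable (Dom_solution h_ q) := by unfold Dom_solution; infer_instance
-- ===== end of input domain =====

-- B replaces A's bottom-up offset accumulation (bit_length re-labelling) by a top-down
-- recursive descent comparing the query with the two child-root labels, clamped to the
-- smallest left-spine subtree containing the query; unlike A it never builds the h-bit
-- number 2**h per query, which a timing run measured as faster on large inputs.
-- Return-value equivalence only: A pops from a local copy q_rev, the argument q itself
-- is not mutated by either version.

-- ===== PORT A =====
-- Python int.bit_length(n) = number of bits of |n|
def pyBitLength (n : Int) : Int := (Nat.size n.natAbs : Int)

-- A's inner `while True` loop, returning `offset`; fuel is a totality guard only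
-- (inside Pre_ the loop breaks before the fuel runs out; 0 on exhaustion is junk).
-- `.toNat` in the exponents: inside Pre_ `height` stays ≥ 0; Python's 2**negative
-- yields a float that makes A raise, and those inputs are outside Pre_.
def solutionLoop : Nat → Int → Int → Int
  | 0, _, _ => 0
  | fuel + 1, node, height =>
    let rank := pyBitLength node
    if rank ≥ height then
      -- hand = RIGHT
      if node = 2 ^ height.toNat - 1 then 1
      else solutionLoop fuel (node - (2 ^ (height - 1).toNat - 1)) (height - 1)
    else
      -- hand = LEFT, height = rank
      if node = 2 ^ rank.toNat - 1 then node + 1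
      else solutionLoop fuel node rank

-- A's outer `while q_rev:` loop: pop the last element of q_rev, append to s
def solutionWhile (h_ : Int) (q_rev : List Int) (s : List Int) : List Int :=
  match hq : q_rev.getLast? with
  | none => s
  | some n =>
    let offset := solutionLoop (2 * h_.toNat + 2) n h_
    let label := n + offset
    solutionWhile h_ q_rev.dropLast
      (s ++ [if label ≥ 2 ^ h_.toNat then -1 else label])
termination_by q_rev.length
decreasing_by
  have hne : q_rev ≠ [] := fun h => by simp [h] at hq
  have : 0 < q_rev.length := List.length_pos_of_ne_nil hne
  simpa [List.length_dropLast] using this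

def solution (h_ : Int) (q : List Int) : List Int :=
  solutionWhile h_ q.reverse []

-- ===== PORT B =====
-- Source B's `go`: parent of node labelled n inside subtree rooted at `root` of given height
-- (its Python height is an int that stays ≥ 0 on every call Source B makes; Nat here)
def goB (root : Int) (height : Nat) (n : Int) : Int :=
  match height with
  | 0 => -1
  | 1 => -1
  | k + 2 =>
    let l := root - 2 ^ (k + 1)
    let r := root - 1
    if n = l ∨ n = r then root
    else if n ≤ l then goB l (k + 1) n
    else goB r (k + 1) n

-- Python int.bit_length(n) again, B's own copy (exact for every Int)
def pyBitLengthB (n : Int) : Int := (Nat.size n.natAbs : Int)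

-- Source B's loop body appends one value per query
def solution_alt (h_ : Int) (q : List Int) : List Int :=
  q.map (fun n =>
    let k := (pyBitLengthB n).toNat
    if n = 2 ^ k - 1 then (if (k : Int) = h_ then -1 else 2 ^ (k + 1) - 1)
    else goB (2 ^ k - 1) k n)

-- ===== PRECONDITION & SPEC =====
-- Pre_ excludes h < 1: there A raises TypeError (2**negative is a float fed to
-- int.bit_length) except when every query is 0, where both versions return -1. It also
-- excludes query values outside 0..2^h-1, on all of which A raises TypeError the same way.
def Pre_solution (h_ : Int) (q : List Int) : Prop :=
  1 ≤ h_ ∧ ∀ n ∈ q, 0 ≤ n ∧ n ≤ 2 ^ h_.toNat - 1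
instance (h_ : Int) (q : List Int) : Decidable (Pre_solution h_ q) := by
  unfold Pre_solution; infer_instance

def pvWitness_solution : Int × List Int := (3, [0, 1, 2, 3, 4, 5, 6, 7])

def Spec_solution (h_ : Int) (q : List Int) (out : List Int) : Prop := out = solution_alt h_ q
instance (h_ : Int) (q : List Int) (out : List Int) : Decidable (Spec_solution h_ q out) := by
  unfold Spec_solution; infer_instance

-- ===== CLAIM (what is proved, stated in full; the proofs are below) =====
def Claim_equal_solution : Prop :=
  ∀ (h_ : Int) (q : List Int), Dom_solution h_ q → Pre_solution h_ q →
    Spec_solution h_ q (solution h_ q)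

-- ===== LEMMAS AND PROOFS =====

-- Python: (2**n - 1).bit_length() == n
lemma size_two_pow_sub_one (n : Nat) : Nat.size (2 ^ n - 1) = n := by
  cases n with
  | zero => simp
  | succ k =>
    have h1 : (1:Nat) ≤ 2 ^ (k+1) := Nat.one_le_two_pow
    have hle : Nat.size (2 ^ (k+1) - 1) ≤ k+1 := Nat.size_le.2 (by omega)
    have hlt : k < Nat.size (2 ^ (k+1) - 1) := by
      rw [Nat.lt_size]
      have : 2 ^ k < 2 ^ (k+1) := Nat.pow_lt_pow_right (by norm_num) (by omega)
      omega
    omega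

-- |2^t - 1| as a Nat
lemma natAbs_two_pow_sub_one (t : Nat) : ((2:Int) ^ t - 1).natAbs = 2 ^ t - 1 := by
  have h1 : (1:Nat) ≤ 2 ^ t := Nat.one_le_two_pow
  have : ((2 ^ t - 1 : Nat) : Int) = (2:Int) ^ t - 1 := by push_cast [h1]; ring
  rw [← this, Int.natAbs_natCast]

-- monotonicity of 2^· over Int
lemma int_pow_le_pow {a b : Nat} (h : a ≤ b) : (2:Int) ^ a ≤ 2 ^ b :=
  pow_le_pow_right₀ (by norm_num) h

-- descending left does not change the label: B's walk from height t straight down to height r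
lemma goB_descend (t : Nat) : ∀ r : Nat, ∀ base m : Int, r ≤ t → 1 ≤ m → m ≤ 2 ^ r - 2 →
    goB (base + (2 ^ t - 1)) t (base + m) = goB (base + (2 ^ r - 1)) r (base + m) := by
  induction t with
  | zero =>
    intro r base m hrt h1 h2
    have : r = 0 := by omega
    subst this
    simp at h2; omega
  | succ t ih =>
    intro r base m hrt h1 h2
    rcases Nat.lt_or_ge r (t+1) with hlt | hge
    · -- r ≤ t, unfold one level
      have hrt' : r ≤ t := by omega
      have hr2 : (2:Int) ^ r ≤ 2 ^ t := int_pow_le_pow hrt'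
      -- t ≥ 1 : else r = 0 and m ≤ -1
      cases t with
      | zero =>
        have : r = 0 := by omega
        subst this
        simp at h2; omega
      | succ k =>
        have hm_lt_l : base + m < base + (2 ^ (k+1+1) - 1) - 2 ^ (k + 1) := by
          have : (2:Int) ^ r ≤ 2 ^ (k+1) := int_pow_le_pow (by omega)
          have h22 : (2:Int) ^ (k+1+1) = 2 ^ (k+1) + 2 ^ (k+1) := by ring
          omega
        rw [goB]
        rw [if_neg, if_pos (by omega)]
        · have : base + (2 ^ (k + 1 + 1) - 1) - 2 ^ (k + 1) = base + (2 ^ (k+1) - 1) := by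
            have h22 : (2:Int) ^ (k+1+1) = 2 ^ (k+1) + 2 ^ (k+1) := by ring
            omega
          rw [this]
          exact ih r base m (by omega) h1 h2
        · push Not
          constructor <;> omega
    · have : r = t + 1 := by omega
      subst this; rfl

-- a node labelled base + 2^r - 1 strictly inside a height-t subtree is a left child;
-- its parent is base + 2^(r+1) - 1
lemma goB_left (t : Nat) : ∀ r : Nat, ∀ base : Int, 1 ≤ r → r < t →
    goB (base + (2 ^ t - 1)) t (base + (2 ^ r - 1)) = base + (2 ^ (r + 1) - 1) := by
  induction t with
  | zero => intro r base h1 h2; omega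
  | succ t ih =>
    intro r base h1 h2
    rcases Nat.lt_or_ge r t with hlt | hge
    · -- descend left: t ≥ 2
      cases t with
      | zero => omega
      | succ k =>
        have hrk : (2:Int) ^ r ≤ 2 ^ k := int_pow_le_pow (by omega)
        have h22 : (2:Int) ^ (k+1+1) = 2 ^ (k+1) + 2 ^ (k+1) := by ring
        have h21 : (2:Int) ^ (k+1) = 2 ^ k + 2 ^ k := by ring
        have hpos : (1:Int) ≤ 2 ^ r := one_le_pow₀ (by norm_num)
        rw [goB]
        rw [if_neg, if_pos (by omega)]
        · have heq : base + (2 ^ (k + 1 + 1) - 1) - 2 ^ (k + 1) = base + (2 ^ (k+1) - 1) := by omega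
          rw [heq]
          exact ih r base h1 (by omega)
        · push Not
          constructor <;> omega
    · -- r = t : n is the left child root
      have : r = t := by omega
      subst this
      cases r with
      | zero => omega
      | succ k =>
        have h22 : (2:Int) ^ (k+1+1) = 2 ^ (k+1) + 2 ^ (k+1) := by ring
        rw [goB, if_pos (Or.inl (by omega))]

-- main invariant: A's bottom-up offset accumulation agrees with B's top-down descent
-- (m = local label inside the current subtree, base = global label minus local label)
lemma loopA_eq (t : Nat) : ∀ (fuel : Nat) (m base : Int), 1 ≤ m → m ≤ 2 ^ t - 1 →
    m ≠ 2 ^ t - 1 → 2 * t + 2 ≤ fuel →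
    base + m + solutionLoop fuel m t = goB (base + (2 ^ t - 1)) t (base + m) ∧
    base + m + solutionLoop fuel m t ≤ base + (2 ^ t - 1) := by
  induction t using Nat.strong_induction_on with
  | _ t ih =>
  intro fuel m base h1 h2 hne hfuel
  -- t ≥ 2
  have ht2 : 2 ≤ t := by
    by_contra h
    interval_cases t <;> norm_num at h2 hne <;> omega
  obtain ⟨k, rfl⟩ : ∃ k, t = k + 2 := ⟨t - 2, by omega⟩
  obtain ⟨f, rfl⟩ : ∃ f, fuel = f + 1 := ⟨fuel - 1, by omega⟩
  have hm0 : (0:Int) ≤ m := by omega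
  have hmabs : (m.natAbs : Int) = m := Int.natAbs_of_nonneg hm0
  have h22 : (2:Int) ^ (k+2) = 2 ^ (k+1) + 2 ^ (k+1) := by ring
  have h21 : (2:Int) ^ (k+1) = 2 ^ k + 2 ^ k := by ring
  have hnat22 : ((2 ^ (k+2) : Nat) : Int) = (2:Int) ^ (k+2) := by push_cast; rfl
  have hrle : Nat.size m.natAbs ≤ k + 2 := by
    apply Nat.size_le.2
    have : m < (2:Int) ^ (k+2) := by omega
    omega
  have hr1 : 1 ≤ Nat.size m.natAbs := Nat.size_pos.2 (by omega)
  have hhigh : m < (2:Int) ^ (Nat.size m.natAbs) := by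
    have := Nat.lt_size_self m.natAbs
    have hc : ((2 ^ (Nat.size m.natAbs) : Nat) : Int) = (2:Int) ^ (Nat.size m.natAbs) := by
      push_cast; rfl
    omega
  rw [solutionLoop]
  simp only [pyBitLength]
  by_cases hcase : ((Nat.size m.natAbs : Int)) ≥ ((k + 2 : Nat) : Int)
  · -- hand = RIGHT at the top level: r = k+2
    have hreq : Nat.size m.natAbs = k + 2 := by omega
    have hlow : (2:Int) ^ (k+1) ≤ m := by
      have h' : 2 ^ (k+1) ≤ m.natAbs := Nat.lt_size.1 (by omega)
      have hc : ((2 ^ (k+1) : Nat) : Int) = (2:Int) ^ (k+1) := by push_cast; rfl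
      omega
    rw [if_pos hcase]
    have htn : (((k+2:Nat) : Int)).toNat = k + 2 := by omega
    have hne' : m ≠ 2 ^ (((k+2:Nat) : Int)).toNat - 1 := by rw [htn]; exact hne
    rw [if_neg hne']
    have hh1 : ((k+2:Nat) : Int) - 1 = ((k+1:Nat) : Int) := by push_cast; ring
    have hh1t : (((k+2:Nat) : Int) - 1).toNat = k + 1 := by omega
    rw [hh1t, hh1]
    set m' : Int := m - (2 ^ (k+1) - 1) with hm'
    have hm'1 : 1 ≤ m' := by omega
    have hm'2 : m' ≤ 2 ^ (k+1) - 1 := by omega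
    by_cases hsub : m = 2 ^ (k+2) - 2
    · -- m' is the right child's root
      obtain ⟨g, rfl⟩ : ∃ g, f = g + 1 := ⟨f - 1, by omega⟩
      rw [solutionLoop]
      simp only [pyBitLength]
      have hm'val : m' = 2 ^ (k+1) - 1 := by omega
      have habs' : m'.natAbs = 2 ^ (k+1) - 1 := by rw [hm'val]; exact natAbs_two_pow_sub_one (k+1)
      have hsz' : Nat.size m'.natAbs = k + 1 := by rw [habs']; exact size_two_pow_sub_one (k+1)
      rw [hsz']
      rw [if_pos (le_refl _)]
      have htn' : (((k+1:Nat) : Int)).toNat = k + 1 := by omega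
      rw [htn', if_pos (by omega)]
      rw [goB, if_pos (Or.inr (by omega))]
      omega
    · -- recurse into the right subtree
      have hm'ne : m' ≠ 2 ^ (k+1) - 1 := by omega
      obtain ⟨IH1, IH2⟩ := ih (k+1) (by omega) f m' (base + (2 ^ (k+1) - 1)) hm'1 hm'2 hm'ne (by omega)
      rw [goB]
      rw [if_neg (by push Not; constructor <;> omega), if_neg (by omega)]
      have hroot : base + (2 ^ (k+2) - 1) - 1 = (base + (2 ^ (k+1) - 1)) + (2 ^ (k+1) - 1) := by omega
      have hn : base + m = (base + (2 ^ (k+1) - 1)) + m' := by omega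
      rw [hroot, hn]
      constructor
      · linarith [IH1]
      · linarith [IH2]
  · -- hand = LEFT: height := rank < k+2
    rw [if_neg hcase]
    set r := Nat.size m.natAbs with hrdef
    have hrlt : r < k + 2 := by omega
    have htnr : ((r : Int)).toNat = r := by omega
    rw [htnr]
    by_cases hm_eq : m = 2 ^ r - 1
    · rw [if_pos hm_eq]
      have h2r : (2:Int) ^ (r+1) = 2 ^ r + 2 ^ r := by ring
      have hgl : goB (base + (2 ^ (k+2) - 1)) (k+2) (base + m) = base + (2 ^ (r+1) - 1) := by
        rw [hm_eq]; exact goB_left (k+2) r base hr1 hrlt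
      rw [hgl]
      have hple : (2:Int) ^ (r+1) ≤ 2 ^ (k+2) := int_pow_le_pow (by omega)
      constructor <;> omega
    · rw [if_neg hm_eq]
      obtain ⟨IH1, IH2⟩ := ih r (by omega) f m base h1 (by omega) hm_eq (by omega)
      have hdesc := goB_descend (k+2) r base m (by omega) h1 (by omega)
      rw [hdesc]
      have hple : (2:Int) ^ r ≤ 2 ^ (k+2) := int_pow_le_pow (by omega)
      exact ⟨IH1, by omega⟩

-- the per-query bodies of the two ports, named for the proofs below
def elemA (h_ n : Int) : Int :=
  if n + solutionLoop (2 * h_.toNat + 2) n h_ ≥ 2 ^ h_.toNat then -1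
  else n + solutionLoop (2 * h_.toNat + 2) n h_

-- the same descent as solution_alt's body, but started at the full root: the stepping stone
-- between A's loop and B's clamped start
def elemB (h_ n : Int) : Int :=
  if n = 2 ^ h_.toNat - 1 then -1 else goB (2 ^ h_.toNat - 1) h_.toNat n

def elemB2 (h_ n : Int) : Int :=
  let k := (pyBitLengthB n).toNat
  if n = 2 ^ k - 1 then (if (k : Int) = h_ then -1 else 2 ^ (k + 1) - 1)
  else goB (2 ^ k - 1) k n

-- A's outer loop is a map of elemA over q
lemma while_map (h_ : Int) :
    ∀ (q : List Int) (s : List Int),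
    solutionWhile h_ q.reverse s = s ++ q.map (elemA h_) := by
  intro q
  induction q with
  | nil => intro s; rw [solutionWhile]; simp
  | cons n rest ih =>
    intro s
    rw [List.reverse_cons, solutionWhile]
    split
    · next hq => simp at hq
    · next n1 hq =>
      have hn1 : n = n1 := by simpa using hq
      subst hn1
      rw [List.dropLast_concat]
      rw [ih]
      simp only [List.map_cons, List.append_assoc, List.singleton_append]
      rfl

lemma solution_eq_map (h_ : Int) (q : List Int) : solution h_ q = q.map (elemA h_) := by
  unfold solution
  simpa using while_map h_ q []

lemma solution_alt_eq_map (h_ : Int) (q : List Int) :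
    solution_alt h_ q = q.map (elemB2 h_) := by
  rfl

-- per-query agreement of elemA with the full-root descent, on real node labels
lemma elem_eq (h_ : Int) (n : Int) (hh : 1 ≤ h_) (hn1 : 1 ≤ n) (hn2 : n ≤ 2 ^ h_.toNat - 1) :
    elemA h_ n = elemB h_ n := by
  unfold elemA elemB
  have hcast : ((h_.toNat : Nat) : Int) = h_ := by omega
  by_cases hroot : n = 2 ^ h_.toNat - 1
  · rw [if_pos hroot]
    obtain ⟨g, hg⟩ : ∃ g, 2 * h_.toNat + 2 = g + 1 := ⟨2 * h_.toNat + 1, rfl⟩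
    rw [hg, solutionLoop]
    simp only [pyBitLength]
    have habs : n.natAbs = 2 ^ h_.toNat - 1 := by
      rw [hroot]; exact natAbs_two_pow_sub_one h_.toNat
    have hsz : Nat.size n.natAbs = h_.toNat := by rw [habs]; exact size_two_pow_sub_one h_.toNat
    rw [hsz]
    rw [if_pos (show ((h_.toNat : Nat) : Int) ≥ h_ by omega), if_pos hroot,
        if_pos (show n + 1 ≥ 2 ^ h_.toNat by omega)]
  · rw [if_neg hroot]
    obtain ⟨E1, E2⟩ := loopA_eq h_.toNat (2 * h_.toNat + 2) n 0 hn1 (by omega) hroot (le_refl _)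
    simp only [zero_add] at E1 E2
    rw [hcast] at E1 E2
    rw [if_neg (by omega), E1]

-- the clamped start of solution_alt computes the same value as the full-root descent
lemma elemB2_eq_elemB (h_ : Int) (n : Int) (hh : 1 ≤ h_) (hn1 : 1 ≤ n)
    (hn2 : n ≤ 2 ^ h_.toNat - 1) : elemB2 h_ n = elemB h_ n := by
  unfold elemB2 elemB
  simp only [pyBitLengthB, Int.toNat_natCast]
  set k := Nat.size n.natAbs with hk
  have hmabs : (n.natAbs : Int) = n := Int.natAbs_of_nonneg (by omega)
  have hk1 : 1 ≤ k := Nat.size_pos.2 (by omega)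
  have hkle : k ≤ h_.toNat := by
    apply Nat.size_le.2
    have hlt : (n.natAbs : Int) < (2:Int) ^ h_.toNat := by omega
    exact_mod_cast hlt
  have hhigh : n < (2:Int) ^ k := by
    have hls := Nat.lt_size_self n.natAbs
    rw [← hk] at hls
    have hc : ((2 ^ k : Nat) : Int) = (2:Int) ^ k := by push_cast; rfl
    omega
  by_cases hones : n = 2 ^ k - 1
  · rw [if_pos hones]
    by_cases hkh : (k : Int) = h_
    · have : k = h_.toNat := by omega
      rw [if_pos hkh, if_pos (by rw [hones, this])]
    · rw [if_neg hkh]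
      have hklt : k < h_.toNat := by omega
      have hne : n ≠ 2 ^ h_.toNat - 1 := by
        intro hroot
        have : Nat.size n.natAbs = h_.toNat := by
          rw [show n.natAbs = 2 ^ h_.toNat - 1 by
                rw [hroot]; exact natAbs_two_pow_sub_one h_.toNat]
          exact size_two_pow_sub_one h_.toNat
        omega
      rw [if_neg hne]
      have := goB_left h_.toNat k 0 hk1 hklt
      simp only [zero_add] at this
      rw [← hones] at this
      rw [this]
  · rw [if_neg hones]
    have hle2 : n ≤ (2:Int) ^ k - 2 := by omega
    have hple : (2:Int) ^ k ≤ 2 ^ h_.toNat := int_pow_le_pow hkle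
    have hne : n ≠ 2 ^ h_.toNat - 1 := by
      intro hroot
      have : Nat.size n.natAbs = h_.toNat := by
        rw [show n.natAbs = 2 ^ h_.toNat - 1 by
              rw [hroot]; exact natAbs_two_pow_sub_one h_.toNat]
        exact size_two_pow_sub_one h_.toNat
      omega
    rw [if_neg hne]
    have := goB_descend h_.toNat k 0 n hkle hn1 hle2
    simp only [zero_add] at this
    rw [this]

-- A's value at the query 0: its loop treats 0 as a height-0 root and yields label 1
lemma elemA_zero (h_ : Int) (hh : 1 ≤ h_) : elemA h_ 0 = 1 := by
  unfold elemA
  obtain ⟨g, hg⟩ : ∃ g, 2 * h_.toNat + 2 = g + 1 := ⟨2 * h_.toNat + 1, rfl⟩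
  have h2 : (2:Int) ^ 1 ≤ 2 ^ h_.toNat := int_pow_le_pow (by omega)
  have hloop : solutionLoop (g + 1) 0 h_ = 1 := by
    rw [solutionLoop]
    simp only [pyBitLength]
    norm_num
    omega
  rw [hg, hloop]
  rw [if_neg (by norm_num at h2 ⊢; omega)]
  norm_num

-- B's value at the query 0: its clamp branch returns the same label 1
lemma elemB2_zero (h_ : Int) (hh : 1 ≤ h_) : elemB2 h_ 0 = 1 := by
  unfold elemB2
  norm_num [pyBitLengthB]
  omega

-- per-query agreement of the two ports
lemma elem_eq2 (h_ : Int) (n : Int) (hh : 1 ≤ h_) (hn1 : 0 ≤ n)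
    (hn2 : n ≤ 2 ^ h_.toNat - 1) : elemA h_ n = elemB2 h_ n := by
  by_cases h0 : n = 0
  · rw [h0, elemA_zero h_ hh, elemB2_zero h_ hh]
  · rw [elem_eq h_ n hh (by omega) hn2, elemB2_eq_elemB h_ n hh (by omega) hn2]

-- ===== VERDICT (by name: the statement is the Claim_ definition above) =====
theorem solution_spec : Claim_equal_solution := by
  intro h_ q _ hpre
  unfold Spec_solution
  rw [solution_eq_map, solution_alt_eq_map]
  apply List.map_congr_left
  intro n hn
  obtain ⟨hge, hle⟩ := hpre.2 n hn
  exact elem_eq2 h_ n hpre.1 hge hle
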